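-- pv_equiv track=rewrite | github.com/thedeadparrot/ficbot | generator.py | enforce_character_limit
-- ===== SOURCE A (Python) =====
-- def enforce_character_limit(sequence, character_limit):
--     """
--     Truncate the sequence such that the words inside it fit inside the character limit.
--
--     Args:
--         - sequence (list of str) - The sequence of words that need to be truncated
--         - character_limit (int) - the number of characters that can be in our final text sequence
--
--     Returns:
--         A list of str, where the number of characters in the strings (plus spaces) fit inside character_limit.
--     """
--     final_sequence = []
--     character_length = 0
--     for word in sequence:
--         # Add the length of the word plus one space.
--         # This overestimates the length, but that's fine.
--         character_length = character_length + len(word) + 1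
--         if character_length > character_limit:
--             break
--         final_sequence.append(word)
--
--     return final_sequence
-- ===== SOURCE B (Python) =====
-- def enforce_character_limit(sequence, character_limit):
--     # Build the running cost table (len(word) + 1 per word), count how many
--     # leading entries stay within the limit, then slice the original list.
--     prefix = []
--     total = 0
--     for w in sequence:
--         total += len(w) + 1
--         prefix.append(total)
--     cutoff = 0
--     while cutoff < len(prefix) and prefix[cutoff] <= character_limit:
--         cutoff += 1
--     return sequence[:cutoff]
-- ===== Notes on version B (the rewrite author's own statement) =====
-- stated objective: alternative
-- what changed: Replaces the scan-and-break loop that appends words one by one with a prefix-sum cost table, a count of leading entries within the limit, and a single slice of the input list.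
import Mathlib
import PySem

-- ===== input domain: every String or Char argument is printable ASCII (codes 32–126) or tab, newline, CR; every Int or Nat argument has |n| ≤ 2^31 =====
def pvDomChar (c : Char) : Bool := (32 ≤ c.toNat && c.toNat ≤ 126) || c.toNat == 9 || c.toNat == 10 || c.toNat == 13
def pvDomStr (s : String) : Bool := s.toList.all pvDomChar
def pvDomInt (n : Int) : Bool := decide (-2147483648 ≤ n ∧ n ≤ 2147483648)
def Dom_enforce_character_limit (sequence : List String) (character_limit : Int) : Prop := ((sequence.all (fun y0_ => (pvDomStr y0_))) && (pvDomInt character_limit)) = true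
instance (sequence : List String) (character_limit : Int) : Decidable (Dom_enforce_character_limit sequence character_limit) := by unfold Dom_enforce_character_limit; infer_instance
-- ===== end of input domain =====

-- B builds a prefix-sum cost table and slices the input; A scans with an early break. Equal on all inputs.

-- ===== PORT A =====
-- the for-loop with break, as structural recursion on the remaining words with the running character_length
def eclGo (character_limit : Int) : List String → Int → List String
  | [], _ => []
  | w :: ws, character_length =>
    let character_length' := character_length + PySem.Str.len w + 1
    if character_limit < character_length' then []
    else w :: eclGo character_limit ws character_length'

def enforce_character_limit (sequence : List String) (character_limit : Int) : List String :=
  eclGo character_limit sequence 0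

-- ===== PORT B =====
-- first loop of Source B: the running-total table `prefix`
def eclPrefix : List String → Int → List Int
  | [], _ => []
  | w :: ws, total =>
    let total' := total + PySem.Str.len w + 1
    total' :: eclPrefix ws total'

-- second loop of Source B: advance cutoff while prefix[cutoff] <= character_limit
def eclCutoff (character_limit : Int) : List Int → Nat
  | [] => 0
  | c :: cs => if c ≤ character_limit then 1 + eclCutoff character_limit cs else 0

def enforce_character_limit_alt (sequence : List String) (character_limit : Int) : List String :=
  sequence.take (eclCutoff character_limit (eclPrefix sequence 0))

-- ===== PRECONDITION & SPEC =====
def Spec_enforce_character_limit (sequence : List String) (character_limit : Int) (out : List String) : Prop := out = enforce_character_limit_alt sequence character_limit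
instance (sequence : List String) (character_limit : Int) (out : List String) : Decidable (Spec_enforce_character_limit sequence character_limit out) := by unfold Spec_enforce_character_limit; infer_instance

-- ===== CLAIM (what is proved, stated in full; the proofs are below) =====
def Claim_equal_enforce_character_limit : Prop := ∀ (sequence : List String) (character_limit : Int), Dom_enforce_character_limit sequence character_limit → Spec_enforce_character_limit sequence character_limit (enforce_character_limit sequence character_limit)

-- ===== LEMMAS AND PROOFS =====
theorem eclGo_eq_take (character_limit : Int) (ws : List String) :
    ∀ acc : Int, eclGo character_limit ws acc
      = ws.take (eclCutoff character_limit (eclPrefix ws acc)) := by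
  induction ws with
  | nil => intro acc; simp [eclGo, eclPrefix, eclCutoff]
  | cons w ws ih =>
    intro acc
    simp only [eclGo, eclPrefix, eclCutoff, ih]
    split_ifs with h1 h2
    · omega
    · rfl
    · rw [Nat.add_comm, List.take_succ_cons]
    · omega

-- ===== VERDICT (by name: the statement is the Claim_ definition above) =====
theorem enforce_character_limit_spec : Claim_equal_enforce_character_limit := by
  intro sequence character_limit _
  unfold Spec_enforce_character_limit enforce_character_limit enforce_character_limit_alt
  exact eclGo_eq_take character_limit sequence 0
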